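-- pv_equiv track=rewrite | github.com/ishan12206/Limit-Order-Book-Microstructure-Simulation | recovery_time_analysis.py | compute_recovery_times
-- ===== SOURCE A (Python) =====
-- LOW_SPREAD = 5
--
-- HIGH_SPREAD = 15
--
-- def compute_recovery_times(spreads, high=HIGH_SPREAD, low=LOW_SPREAD):
--     recovery_times = []
--     n = len(spreads)
--     i = 0
--     while i < n:
--         if spreads[i] > high:
--             j = i + 1
--             while j < n and spreads[j] > low:
--                 j += 1
--             recovery_times.append(j - i)
--             i = j
--         else:
--             i += 1
--     return recovery_times
-- ===== SOURCE B (Python) =====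
-- LOW_SPREAD = 5
--
-- HIGH_SPREAD = 15
--
-- def compute_recovery_times(spreads, high=HIGH_SPREAD, low=LOW_SPREAD):
--     recovery_times = []
--     start = None
--     for idx, s in enumerate(spreads):
--         if start is not None and s <= low:
--             recovery_times.append(idx - start)
--             start = None
--         if start is None and s > high:
--             start = idx
--     if start is not None:
--         recovery_times.append(len(spreads) - start)
--     return recovery_times
-- ===== Notes on version B (the rewrite author's own statement) =====
-- stated objective: simpler
-- what changed: Replaced the nested while loop with index jumps (i=j) by a single flat for-loop over enumerate(spreads) driven by a start=None state variable, with an unrecovered-tail flush after the loop.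
import Mathlib
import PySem

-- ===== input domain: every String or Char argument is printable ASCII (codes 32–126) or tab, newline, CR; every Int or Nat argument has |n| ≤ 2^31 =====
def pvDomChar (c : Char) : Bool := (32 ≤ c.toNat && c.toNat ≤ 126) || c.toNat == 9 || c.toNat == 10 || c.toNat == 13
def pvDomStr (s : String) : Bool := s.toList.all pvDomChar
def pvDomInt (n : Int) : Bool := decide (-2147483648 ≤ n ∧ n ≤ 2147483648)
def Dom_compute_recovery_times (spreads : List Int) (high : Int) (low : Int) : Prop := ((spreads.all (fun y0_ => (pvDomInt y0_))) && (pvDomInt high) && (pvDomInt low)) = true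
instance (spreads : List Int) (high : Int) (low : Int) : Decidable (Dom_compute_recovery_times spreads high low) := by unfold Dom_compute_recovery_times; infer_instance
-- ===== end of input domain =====

-- B replaces A's nested while loops with index jumps by one flat enumerate pass
-- driven by a start-of-spike state variable (objective: simpler).

-- ===== PORT A =====
-- inner while loop: 'while j < n and spreads[j] > low: j += 1' (j stays a natural index 0..n)
def innerA (s : List Int) (low : Int) (j : Nat) : Nat :=
  if _h : j < s.length ∧ s.getD j 0 > low then innerA s low (j + 1) else j
termination_by s.length - j
decreasing_by omega

theorem le_innerA (s : List Int) (low : Int) (j : Nat) : j ≤ innerA s low j := by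
  unfold innerA
  split
  · have := le_innerA s low (j + 1); omega
  · exact le_refl j
termination_by s.length - j
decreasing_by omega

-- outer while loop; spreads[i]/spreads[j] are always in range (0 ≤ i < n), so getD is exact
def outerA (s : List Int) (high low : Int) (i : Nat) (acc : List Int) : List Int :=
  if _h : i < s.length then
    if s.getD i 0 > high then
      outerA s high low (innerA s low (i + 1)) (acc ++ [((innerA s low (i + 1) : Nat) : Int) - (i : Int)])
    else outerA s high low (i + 1) acc
  else acc
termination_by s.length - i
decreasing_by
  · have := le_innerA s low (i + 1); omega
  · omega

def compute_recovery_times (spreads : List Int) (high : Int) (low : Int) : List Int :=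
  outerA spreads high low 0 []

-- ===== PORT B =====
-- one loop iteration of B: 'if start is not None and s <= low: append; start=None' then
-- 'if start is None and s > high: start = idx'
def stepB (high low : Int) (st : List Int × Option Int) (p : Int × Int) : List Int × Option Int :=
  let st1 : List Int × Option Int :=
    match st.2 with
    | some t => if p.2 ≤ low then (st.1 ++ [p.1 - t], none) else st
    | none => st
  match st1.2 with
  | none => if p.2 > high then (st1.1, some p.1) else st1
  | some _ => st1

def compute_recovery_times_alt (spreads : List Int) (high : Int) (low : Int) : List Int :=
  let r := (PySem.List.enumerate spreads 0).foldl (stepB high low) ([], none)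
  match r.2 with
  | some t => r.1 ++ [PySem.List.len spreads - t]
  | none => r.1

-- ===== PRECONDITION & SPEC =====
def Spec_compute_recovery_times (spreads : List Int) (high : Int) (low : Int) (out : List Int) : Prop := out = compute_recovery_times_alt spreads high low
instance (spreads : List Int) (high : Int) (low : Int) (out : List Int) : Decidable (Spec_compute_recovery_times spreads high low out) := by unfold Spec_compute_recovery_times; infer_instance

-- ===== CLAIM (what is proved, stated in full; the proofs are below) =====
def Claim_equal_compute_recovery_times : Prop := ∀ (spreads : List Int) (high : Int) (low : Int), Dom_compute_recovery_times spreads high low → Spec_compute_recovery_times spreads high low (compute_recovery_times spreads high low)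

-- ===== LEMMAS AND PROOFS =====

-- "run B from index i onward and flush": the rest of B's loop plus its tail flush
def runB (s : List Int) (high low : Int) (i : Nat) (st : List Int × Option Int) : List Int :=
  let r := (PySem.List.enumerate (s.drop i) (i : Int)).foldl (stepB high low) st
  match r.2 with
  | some t => r.1 ++ [((s.length : Nat) : Int) - t]
  | none => r.1

theorem runB_ge (s : List Int) (high low : Int) (i : Nat) (hi : s.length ≤ i) (st : List Int × Option Int) :
    runB s high low i st = match st.2 with
      | some t => st.1 ++ [((s.length : Nat) : Int) - t]
      | none => st.1 := by
  unfold runB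
  rw [List.drop_eq_nil_of_le hi]
  simp [PySem.List.enumerate]

theorem runB_step (s : List Int) (high low : Int) (i : Nat) (hi : i < s.length) (st : List Int × Option Int) :
    runB s high low i st = runB s high low (i + 1) (stepB high low st ((i : Int), s[i])) := by
  unfold runB
  rw [List.drop_eq_getElem_cons hi, PySem.List.enumerate_cons]
  simp only [List.foldl_cons]
  norm_num

-- one-step equations for A's loops
theorem innerA_stop (s : List Int) (low : Int) (i : Nat) (h : ¬ (i < s.length ∧ s.getD i 0 > low)) :
    innerA s low i = i := by rw [innerA, dif_neg h]

theorem innerA_go (s : List Int) (low : Int) (i : Nat) (h : i < s.length ∧ s.getD i 0 > low) :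
    innerA s low i = innerA s low (i + 1) := by rw [innerA, dif_pos h]

theorem outerA_stop (s : List Int) (high low : Int) (i : Nat) (acc : List Int)
    (h : ¬ i < s.length) : outerA s high low i acc = acc := by rw [outerA, dif_neg h]

theorem outerA_spike (s : List Int) (high low : Int) (i : Nat) (acc : List Int)
    (h1 : i < s.length) (h2 : s.getD i 0 > high) :
    outerA s high low i acc =
      outerA s high low (innerA s low (i + 1)) (acc ++ [((innerA s low (i + 1) : Nat) : Int) - (i : Int)]) := by
  rw [outerA, dif_pos h1, if_pos h2]

theorem outerA_skip (s : List Int) (high low : Int) (i : Nat) (acc : List Int)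
    (h1 : i < s.length) (h2 : ¬ s.getD i 0 > high) :
    outerA s high low i acc = outerA s high low (i + 1) acc := by
  rw [outerA, dif_pos h1, if_neg h2]

-- the main invariant, both loop states at once, by strong induction on s.length - i
theorem main_inv (s : List Int) (high low : Int) :
    ∀ (k i : Nat), s.length - i = k → i ≤ s.length →
      (∀ acc : List Int, runB s high low i (acc, none) = outerA s high low i acc) ∧
      (∀ (acc : List Int) (t : Int),
        runB s high low i (acc, some t) =
          outerA s high low (innerA s low i) (acc ++ [((innerA s low i : Nat) : Int) - t])) := by
  intro k
  induction k using Nat.strong_induction_on with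
  | _ k IH =>
    intro i hk hi
    by_cases hin : i < s.length
    · have hgd : s.getD i 0 = s[i] := List.getD_eq_getElem s 0 hin
      have hstep := fun st => runB_step s high low i hin st
      have hIH := IH (s.length - (i + 1)) (by omega) (i + 1) rfl (by omega)
      constructor
      · intro acc
        rw [hstep]
        by_cases hh : s[i] > high
        · simp only [stepB, if_pos hh]
          rw [hIH.2 acc (i : Int), outerA_spike s high low i acc hin (hgd ▸ hh)]
        · simp only [stepB, if_neg hh]
          rw [hIH.1 acc, outerA_skip s high low i acc hin (by omega)]
      · intro acc t
        rw [hstep]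
        by_cases hl : s[i] > low
        · rw [innerA_go s low i ⟨hin, hgd ▸ hl⟩]
          simp only [stepB, if_neg (not_le_of_gt hl)]
          exact hIH.2 acc t
        · rw [innerA_stop s low i (by omega)]
          have hle : s[i] ≤ low := not_lt.mp hl
          by_cases hh : s[i] > high
          · simp only [stepB, if_pos hle, if_pos hh]
            rw [hIH.2 (acc ++ [(i : Int) - t]) (i : Int),
              outerA_spike s high low i (acc ++ [(i : Int) - t]) hin (hgd ▸ hh),
              List.append_assoc]
          · simp only [stepB, if_pos hle, if_neg hh]
            rw [hIH.1 (acc ++ [(i : Int) - t]), outerA_skip s high low i _ hin (by omega)]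
    · have hieq : i = s.length := by omega
      have hj : innerA s low i = i := innerA_stop s low i (by omega)
      constructor
      · intro acc
        rw [runB_ge s high low i (by omega), outerA_stop s high low i acc hin]
      · intro acc t
        rw [runB_ge s high low i (by omega), hj, outerA_stop s high low i _ hin, hieq]

theorem alt_eq_runB (s : List Int) (high low : Int) :
    compute_recovery_times_alt s high low = runB s high low 0 ([], none) := by
  unfold compute_recovery_times_alt runB
  simp [PySem.List.len_eq]

-- ===== VERDICT (by name: the statement is the Claim_ definition above) =====
theorem compute_recovery_times_spec : Claim_equal_compute_recovery_times := by
  intro spreads high low _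
  unfold Spec_compute_recovery_times
  rw [alt_eq_runB]
  rw [(main_inv spreads high low (spreads.length) 0 (by omega) (by omega)).1 []]
  rfl
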